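-- pv_equiv track=rewrite | github.com/antonpalets/Othello-AI | Othello_AI.py | vis
-- ===== SOURCE A (Python) =====
-- def vis(state,board=8):
--     b,w = state
--     pic = ' abcdefgh\n'
--     for row in range(0,board):
--         pic+='{}'.format(row+1)
--         for col in range(0,board):
--             if (row, col) not in b and (row, col) not in w: pic += '.'
--             elif (row, col) in b: pic += 'X'
--             else: pic += 'O'
--         pic += '\n'
--     return pic
-- ===== SOURCE B (Python) =====
-- def vis(state, board=8):
--     b, w = state
--     n = board
--     grid = [['.'] * n for _ in range(n)]
--     for (r, c) in w:
--         if 0 <= r < n and 0 <= c < n: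
--             grid[r][c] = 'O'
--     for (r, c) in b:
--         if 0 <= r < n and 0 <= c < n:
--             grid[r][c] = 'X'
--     out = ' abcdefgh\n'
--     for i, row in enumerate(grid):
--         out += str(i + 1) + ''.join(row) + '\n'
--     return out
-- ===== Notes on version B (the rewrite author's own statement) =====
-- stated objective: alternative
-- what changed: Instead of A's nested loops testing every cell's membership in both piece lists, B builds a '.'-filled 2D grid, scatters the white then the black pieces onto it by index (black overwriting white, out-of-range pieces skipped), and joins the rows, removing the per-cell list scans.
import Mathlib
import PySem

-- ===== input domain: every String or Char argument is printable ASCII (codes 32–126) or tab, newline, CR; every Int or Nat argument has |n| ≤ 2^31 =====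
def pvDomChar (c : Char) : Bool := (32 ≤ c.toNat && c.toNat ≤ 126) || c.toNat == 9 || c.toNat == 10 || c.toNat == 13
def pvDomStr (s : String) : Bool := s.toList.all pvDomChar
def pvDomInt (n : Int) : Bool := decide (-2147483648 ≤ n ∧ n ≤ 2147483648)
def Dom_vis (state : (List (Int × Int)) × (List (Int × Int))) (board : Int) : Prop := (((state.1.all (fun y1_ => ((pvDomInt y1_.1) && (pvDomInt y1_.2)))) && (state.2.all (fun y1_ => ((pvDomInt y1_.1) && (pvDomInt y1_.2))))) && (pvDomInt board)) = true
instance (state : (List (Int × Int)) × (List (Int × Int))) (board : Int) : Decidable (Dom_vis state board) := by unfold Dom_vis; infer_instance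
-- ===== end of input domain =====

-- B renders the board by a different decomposition: build a '.'-filled 2D grid, scatter the
-- white then the black pieces onto it by index (skipping out-of-range coordinates), and join
-- the rows — removing A's per-cell membership scans of both piece lists.

-- ===== PORT A =====
def vis (state : (List (Int × Int)) × (List (Int × Int))) (board : Int) : String :=
  let b := state.1
  let w := state.2
  let pic := " abcdefgh\n"
  (PySem.List.pyRange 0 board 1).foldl (fun pic row =>
    let pic := pic ++ PySem.Int.toStr (row + 1)
    let pic := (PySem.List.pyRange 0 board 1).foldl (fun pic col =>
      if (row, col) ∉ b ∧ (row, col) ∉ w then pic ++ "."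
      else if (row, col) ∈ b then pic ++ "X"
      else pic ++ "O") pic
    pic ++ "\n") pic

-- ===== PORT B =====
-- place piece character ch at every in-range coordinate of ps (the two scatter loops of Source B)
def visScatter (g : List (List Char)) (ps : List (Int × Int)) (ch : Char) (n : Int) :
    List (List Char) :=
  ps.foldl (fun g p =>
    if 0 ≤ p.1 ∧ p.1 < n ∧ 0 ≤ p.2 ∧ p.2 < n then
      g.modify p.1.toNat (fun row => row.set p.2.toNat ch)
    else g) g

def vis_alt (state : (List (Int × Int)) × (List (Int × Int))) (board : Int) : String :=
  let b := state.1
  let w := state.2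
  let n := board
  let grid := List.replicate n.toNat (List.replicate n.toNat '.')
  let grid := visScatter grid w 'O' n
  let grid := visScatter grid b 'X' n
  (PySem.List.enumerate grid).foldl
    (fun out p => out ++ PySem.Int.toStr (p.1 + 1) ++ String.ofList p.2 ++ "\n")
    " abcdefgh\n"

-- ===== PRECONDITION & SPEC =====
def Spec_vis (state : (List (Int × Int)) × (List (Int × Int))) (board : Int) (out : String) : Prop := out = vis_alt state board
instance (state : (List (Int × Int)) × (List (Int × Int))) (board : Int) (out : String) : Decidable (Spec_vis state board out) := by unfold Spec_vis; infer_instance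

-- ===== CLAIM (what is proved, stated in full; the proofs are below) =====
def Claim_equal_vis : Prop := ∀ (state : (List (Int × Int)) × (List (Int × Int))) (board : Int), Dom_vis state board → Spec_vis state board (vis state board)

-- ===== LEMMAS AND PROOFS =====

-- the character both programs place at cell (r, c)
def visCell (b w : List (Int × Int)) (r c : Int) : Char :=
  if (r, c) ∈ b then 'X' else if (r, c) ∈ w then 'O' else '.'

-- the character of the grid at row r, column c (defaults never reached in use)
def cellAt (g : List (List Char)) (r c : Nat) : Char := (g.getD r []).getD c ' '

theorem flatMap_single {α β : Type} (f : α → β) (l : List α) :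
    l.flatMap (fun x => [f x]) = l.map f := by
  induction l with
  | nil => rfl
  | cons x xs ih => simp [ih]

theorem foldl_string_toList {α : Type} (f : String → α → String) (g : α → List Char)
    (hf : ∀ s x, (f s x).toList = s.toList ++ g x) :
    ∀ (l : List α) (s : String), (l.foldl f s).toList = s.toList ++ l.flatMap g := by
  intro l
  induction l with
  | nil => simp
  | cons x xs ih => intro s; simp [List.foldl_cons, ih, hf]

theorem mem_modify {α : Type} (l : List α) (i : Nat) (f : α → α) (x : α)
    (hx : x ∈ l.modify i f) : x ∈ l ∨ ∃ y ∈ l, x = f y := by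
  rcases List.mem_iff_getElem.1 hx with ⟨j, hj, hje⟩
  have hj' : j < l.length := by simpa using hj
  have h1 : (l.modify i f)[j]? = some x := by
    rw [List.getElem?_eq_getElem hj, hje]
  rw [List.getElem?_modify, List.getElem?_eq_getElem hj'] at h1
  by_cases hij : i = j
  · simp only [hij, Option.map_eq_map, Option.map_some, Option.some.injEq] at h1
    exact Or.inr ⟨l[j], List.getElem_mem hj', h1.symm⟩
  · simp only [hij, Option.map_eq_map, Option.map_some, Option.some.injEq,
  ite_false] at h1
    exact Or.inl (h1 ▸ List.getElem_mem hj')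

theorem rowlen_visScatter (g : List (List Char)) (ps : List (Int × Int)) (ch : Char) (n : Int)
    (m : Nat) (h : ∀ row ∈ g, row.length = m) :
    ∀ row ∈ visScatter g ps ch n, row.length = m := by
  unfold visScatter
  induction ps generalizing g with
  | nil => exact h
  | cons p ps ih =>
    simp only [List.foldl_cons]
    split
    · refine ih _ ?_
      intro row hrow
      rcases mem_modify _ _ _ _ hrow with h1 | ⟨row', hmem, hrow⟩
      · exact h _ h1
      · subst hrow; simpa using h _ hmem
    · exact ih _ h

theorem length_visScatter (g : List (List Char)) (ps : List (Int × Int)) (ch : Char) (n : Int) :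
    (visScatter g ps ch n).length = g.length := by
  unfold visScatter
  induction ps generalizing g with
  | nil => rfl
  | cons p ps ih =>
    simp only [List.foldl_cons]
    split <;> simp [ih]

theorem cellAt_visScatter (ch : Char) (n : Int) (m : Nat) (ps : List (Int × Int)) :
    ∀ (g : List (List Char)), (∀ row ∈ g, row.length = m) → ∀ (r c : Nat),
      r < g.length → c < m → ((g.length : Int) ≤ n) → ((m : Int) ≤ n) →
      cellAt (visScatter g ps ch n) r c =
        if ((r : Int), (c : Int)) ∈ ps then ch else cellAt g r c := by
  induction ps with
  | nil => intro g _ r c _ _ _ _; simp [visScatter]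
  | cons p ps ih =>
    intro g hrows r c hr hc hgn hmn
    have hstep : visScatter g (p :: ps) ch n =
        visScatter (if 0 ≤ p.1 ∧ p.1 < n ∧ 0 ≤ p.2 ∧ p.2 < n then
          g.modify p.1.toNat (fun row => row.set p.2.toNat ch) else g) ps ch n := by
      simp [visScatter]
    by_cases hin : 0 ≤ p.1 ∧ p.1 < n ∧ 0 ≤ p.2 ∧ p.2 < n
    · -- in-range piece: exactly one cell of g is overwritten with ch
      obtain ⟨h1, h2, h3, h4⟩ := hin
      set g' := g.modify p.1.toNat (fun row => row.set p.2.toNat ch) with hg'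
      have hlen' : g'.length = g.length := by simp [hg']
      have hrows' : ∀ row ∈ g', row.length = m := by
        intro row hrow
        rcases mem_modify _ _ _ _ hrow with hmem | ⟨row', hmem, hrow⟩
        · exact hrows _ hmem
        · subst hrow; simpa using hrows _ hmem
      rw [hstep, if_pos ⟨h1, h2, h3, h4⟩]
      rw [ih g' hrows' r c (hlen' ▸ hr) hc (hlen' ▸ hgn) hmn]
      have hrowlen : (g.getD r []).length = m := by
        rw [List.getD_eq_getElem?_getD, List.getElem?_eq_getElem hr]
        exact hrows _ (List.getElem_mem hr)
      have hcell : cellAt g' r c =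
          if p = ((r : Int), (c : Int)) then ch else cellAt g r c := by
        unfold cellAt
        have hgr' : g'.getD r [] =
            if p.1.toNat = r then (g.getD r []).set p.2.toNat ch else g.getD r [] := by
          rw [hg', List.getD_eq_getElem?_getD, List.getElem?_modify,
              List.getElem?_eq_getElem hr]
          by_cases hpr : p.1.toNat = r <;>
            simp [hpr, List.getD_eq_getElem?_getD, List.getElem?_eq_getElem hr]
        rw [hgr']
        by_cases hpr : p.1.toNat = r
        · by_cases hpc : p.2.toNat = c
          · have hp : p = ((r : Int), (c : Int)) := by
              have e1 := Int.toNat_of_nonneg h1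
              have e2 := Int.toNat_of_nonneg h3
              apply Prod.ext <;> simp <;> omega
            rw [if_pos hpr, if_pos hp, List.getD_eq_getElem?_getD, hpc,
                List.getElem?_set_self (by omega)]
            rfl
          · have hp : p ≠ ((r : Int), (c : Int)) := fun h => hpc (by rw [h]; simp)
            rw [if_pos hpr, if_neg hp, List.getD_eq_getElem?_getD,
                List.getElem?_set_ne hpc, ← List.getD_eq_getElem?_getD]
        · have hp : p ≠ ((r : Int), (c : Int)) := fun h => hpr (by rw [h]; simp)
          rw [if_neg hpr, if_neg hp]
      rw [hcell]
      by_cases hmem : ((r : Int), (c : Int)) ∈ ps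
      · simp [hmem]
      · by_cases hp : p = ((r : Int), (c : Int))
        · rw [hp]; simp
        · have hp' : ¬ (((r : Int), (c : Int)) = p) := fun h => hp h.symm
          simp [List.mem_cons, hmem, hp, hp']
    · -- out-of-range piece: grid unchanged; p cannot equal the in-range cell (r, c)
      have hp : p ≠ ((r : Int), (c : Int)) := by
        intro h
        apply hin
        rw [h]
        have hrn : ((r : Int)) < n := lt_of_lt_of_le (by exact_mod_cast hr) hgn
        have hcn : ((c : Int)) < n := lt_of_lt_of_le (by exact_mod_cast hc) hmn
        exact ⟨by positivity, hrn, by positivity, hcn⟩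
      have hp' : ¬ (((r : Int), (c : Int)) = p) := fun h => hp h.symm
      rw [hstep, if_neg hin, ih g hrows r c hr hc hgn hmn]
      simp [List.mem_cons, hp']

theorem visA_toList (b w : List (Int × Int)) (n : Int) :
    (vis (b, w) n).toList =
      " abcdefgh\n".toList ++
        (PySem.List.pyRange 0 n 1).flatMap (fun r =>
          PySem.Int.toChars (r + 1) ++
            (PySem.List.pyRange 0 n 1).map (visCell b w r) ++ ['\n']) := by
  unfold vis
  refine foldl_string_toList _ _ (fun s r => ?_) _ _
  have hinner : ∀ (s : String),
      ((PySem.List.pyRange 0 n 1).foldl (fun pic col =>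
        if (r, col) ∉ b ∧ (r, col) ∉ w then pic ++ "." else
        if (r, col) ∈ b then pic ++ "X" else pic ++ "O") s).toList =
      s.toList ++ (PySem.List.pyRange 0 n 1).map (visCell b w r) := by
    intro s
    rw [foldl_string_toList _ (fun c => [visCell b w r c]) (fun s c => by
      by_cases hb : (r, c) ∈ b <;> by_cases hw : (r, c) ∈ w <;> simp [visCell, hb, hw])]
    rw [flatMap_single]
  simp only [String.toList_append]
  rw [hinner]
  simp [PySem.Int.toList_toStr]

theorem visB_row (b w : List (Int × Int)) (n : Int) (r : Nat) (hr : (r : Int) < n) :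
    (visScatter (visScatter (List.replicate n.toNat (List.replicate n.toNat '.'))
        w 'O' n) b 'X' n).getD r [] =
      (List.range n.toNat).map (fun c : Nat => visCell b w (r : Int) (c : Int)) := by
  have hn0 : 0 ≤ n := le_of_lt (lt_of_le_of_lt (Int.natCast_nonneg r) hr)
  have hcast : ((n.toNat : Nat) : Int) = n := Int.toNat_of_nonneg hn0
  set g0 : List (List Char) := List.replicate n.toNat (List.replicate n.toNat '.') with hg0
  have hg0rows : ∀ row ∈ g0, row.length = n.toNat := by
    intro row hrow
    rw [hg0] at hrow
    rw [List.eq_of_mem_replicate hrow]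
    simp
  have hg1rows : ∀ row ∈ visScatter g0 w 'O' n, row.length = n.toNat :=
    rowlen_visScatter _ _ _ _ _ hg0rows
  have hg2rows : ∀ row ∈ visScatter (visScatter g0 w 'O' n) b 'X' n, row.length = n.toNat :=
    rowlen_visScatter _ _ _ _ _ hg1rows
  have hg0len : g0.length = n.toNat := by simp [hg0]
  have hg1len : (visScatter g0 w 'O' n).length = n.toNat := by
    rw [length_visScatter, hg0len]
  have hg2len : (visScatter (visScatter g0 w 'O' n) b 'X' n).length = n.toNat := by
    rw [length_visScatter, hg1len]
  have hrn : r < n.toNat := by omega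
  have hrowlen2 : ((visScatter (visScatter g0 w 'O' n) b 'X' n).getD r []).length = n.toNat := by
    rw [List.getD_eq_getElem?_getD, List.getElem?_eq_getElem (by rw [hg2len]; exact hrn),
        Option.getD_some]
    exact hg2rows _ (List.getElem_mem _)
  apply List.ext_getElem
  · rw [hrowlen2]; simp
  · intro c hc1 hc2
    simp only [List.getElem_map, List.getElem_range]
    have hcn : c < n.toNat := by simpa using hc2
    have hget : ∀ (g : List (List Char)) (hrg : r < g.length) (hcg : c < (g.getD r []).length),
        (g.getD r [])[c]'hcg = cellAt g r c := by
      intro g hrg hcg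
      unfold cellAt
      rw [List.getD_eq_getElem?_getD (l := g.getD r []), List.getElem?_eq_getElem hcg]
      rfl
    rw [hget _ (by rw [hg2len]; exact hrn) hc1]
    rw [cellAt_visScatter 'X' n n.toNat b _ hg1rows r c (by rw [hg1len]; exact hrn) hcn
        (by rw [hg1len, hcast]) (by rw [hcast])]
    rw [cellAt_visScatter 'O' n n.toNat w _ hg0rows r c (by rw [hg0len]; exact hrn) hcn
        (by rw [hg0len, hcast]) (by rw [hcast])]
    have hdot : cellAt g0 r c = '.' := by
      have h1 : g0.getD r [] = List.replicate n.toNat '.' := by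
        rw [hg0, List.getD_eq_getElem?_getD, List.getElem?_replicate]
        simp [hrn]
      unfold cellAt
      rw [h1, List.getD_eq_getElem?_getD, List.getElem?_replicate]
      simp [hcn]
    rw [hdot]
    unfold visCell
    by_cases hbm : ((r : Int), (c : Int)) ∈ b <;>
      by_cases hwm : ((r : Int), (c : Int)) ∈ w <;> simp [hbm, hwm]

theorem visB_toList (b w : List (Int × Int)) (n : Int) :
    (vis_alt (b, w) n).toList =
      " abcdefgh\n".toList ++
        (PySem.List.pyRange 0 n 1).flatMap (fun r =>
          PySem.Int.toChars (r + 1) ++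
            (PySem.List.pyRange 0 n 1).map (visCell b w r) ++ ['\n']) := by
  unfold vis_alt
  set grid : List (List Char) := visScatter (visScatter
    (List.replicate n.toNat (List.replicate n.toNat '.')) w 'O' n) b 'X' n with hgrid
  have hlen : grid.length = n.toNat := by
    rw [hgrid, length_visScatter, length_visScatter]; simp
  rw [foldl_string_toList _
      (fun p : Int × List Char => PySem.Int.toChars (p.1 + 1) ++ p.2 ++ ['\n'])
      (by intro s p; simp [PySem.Int.toList_toStr, String.toList_ofList]) _ _]
  congr 1
  rw [PySem.List.enumerate_eq_map_pyRange grid [], List.flatMap_map]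
  by_cases hn : 0 ≤ n
  · have hcast : PySem.List.len grid = n := by
      simp [PySem.List.len_eq, hlen, Int.toNat_of_nonneg hn]
    rw [hcast]
    refine List.flatMap_congr (fun j hj => ?_)
    obtain ⟨hj0, hjn⟩ := (PySem.List.mem_pyRange_one).1 hj
    have hjnat : j = ((j.toNat : Nat) : Int) := (Int.toNat_of_nonneg hj0).symm
    rw [hjnat, PySem.List.pyGetD_natCast,
        visB_row b w n j.toNat (by omega)]
    simp only []
    congr 1
    rw [PySem.List.pyRange_one]
    simp [List.map_map, Function.comp]
  · have hnil : PySem.List.pyRange 0 n 1 = [] := PySem.List.pyRange_one_eq_nil (by omega)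
    have hlen0 : PySem.List.len grid = 0 := by
      simp [PySem.List.len_eq, hlen, Int.toNat_of_nonpos (le_of_not_ge hn)]
    rw [hnil, hlen0]
    simp [PySem.List.pyRange_one_eq_nil]

-- ===== VERDICT (by name: the statement is the Claim_ definition above) =====
theorem vis_spec : Claim_equal_vis := by
  intro state board _
  unfold Spec_vis
  obtain ⟨b, w⟩ := state
  apply String.toList_inj.mp
  rw [visA_toList b w board, visB_toList b w board]
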